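-- pv_equiv track=rewrite | github.com/nortikin/sverchok | nodes/text/viewer_text_mk3.py | readFORviewer_sockets_data_small
-- ===== SOURCE A (Python) =====
-- def readFORviewer_sockets_data_small(data, dept, le):
--     cache = ''
--     output = ''
--     deptl = dept - 1
--     if le:
--         cache += ('(' + str(le) + ') object(s)')
--         del(le)
--     if deptl > 0:
--         for i, object in enumerate(data):
--             cache += ('\n' + '=' + str(i) + '=   (' + str(len(object)) + ')')
--             cache += str(readFORviewer_sockets_data_small(object, deptl, False))
--     else:
--         for k, val in enumerate(data):
--             output += ('\n' + str(val))
--     return cache + output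
-- ===== SOURCE B (Python) =====
-- def readFORviewer_sockets_data_small(data, dept, le):
--     parts = []
--     if le:
--         parts.append('(' + str(le) + ') object(s)')
--     stack = [(data, dept - 1, None)]
--     while stack:
--         node, d, label = stack.pop()
--         if label is not None:
--             parts.append('\n=' + str(label) + '=   (' + str(len(node)) + ')')
--         if d > 0:
--             for i in reversed(range(len(node))):
--                 stack.append((node[i], d - 1, i))
--         else:
--             for val in node:
--                 parts.append('\n' + str(val))
--     return ''.join(parts)
-- ===== Notes on version B (the rewrite author's own statement) =====
-- stated objective: idiomatic
-- what changed: Replaces A's recursion-with-string-concatenation by an iterative DFS over an explicit stack of (node, depth, index-label) frames that collects output fragments in a list joined once at the end.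
-- outside the precondition, e.g. on readFORviewer_sockets_data_small([[1]], 3, 1): A raises TypeError, B raises TypeError
import Mathlib
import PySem

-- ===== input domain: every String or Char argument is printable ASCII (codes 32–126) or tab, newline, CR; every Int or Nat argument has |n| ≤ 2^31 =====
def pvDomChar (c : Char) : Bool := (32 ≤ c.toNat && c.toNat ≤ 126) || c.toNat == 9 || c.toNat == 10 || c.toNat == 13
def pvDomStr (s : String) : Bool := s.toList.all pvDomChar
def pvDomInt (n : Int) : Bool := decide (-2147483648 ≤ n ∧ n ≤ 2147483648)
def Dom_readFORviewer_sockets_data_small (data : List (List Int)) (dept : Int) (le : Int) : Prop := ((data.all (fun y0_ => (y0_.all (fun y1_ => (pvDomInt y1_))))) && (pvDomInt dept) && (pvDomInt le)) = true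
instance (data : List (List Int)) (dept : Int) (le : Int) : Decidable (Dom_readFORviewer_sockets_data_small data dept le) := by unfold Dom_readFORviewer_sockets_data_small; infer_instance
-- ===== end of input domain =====

-- B replaces A's recursion by an iterative DFS over an explicit stack of frames that
-- collects output fragments in a list joined once at the end (objective: idiomatic/alternative).

-- str(val) for a Python list of ints, e.g. "[1, 2]" (exact: Python's repr of a list of ints)
def pyStrIntList (l : List Int) : String :=
  "[" ++ PySem.Str.join ", " (l.map PySem.Int.toStr) ++ "]"

-- ===== PORT A =====
-- A's recursive call readFORviewer_sockets_data_small(object, deptl, False) where object is a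
-- row of ints (the recursion is stratified by element type, so it is ported as this helper;
-- le is False, so no header).
def rfA_row (object : List Int) (dept : Int) : String :=
  let deptl := dept - 1
  if deptl > 0 then
    -- Python's loop here computes len(int) and raises TypeError on any element, so under
    -- Pre_ this branch is only ever reached with object = [] and the loop contributes nothing.
    ""
  else
    object.foldl (fun output v => output ++ ("\n" ++ PySem.Int.toStr v)) ""

def readFORviewer_sockets_data_small (data : List (List Int)) (dept : Int) (le : Int) : String :=
  let deptl := dept - 1
  let cache := if le ≠ 0 then "" ++ ("(" ++ PySem.Int.toStr le ++ ") object(s)") else ""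
  if deptl > 0 then
    PySem.List.enumerate data |>.foldl
      (fun cache p =>
        (cache ++ ("\n" ++ "=" ++ PySem.Int.toStr p.1 ++ "=   (" ++ PySem.Int.toStr (p.2.length : Int) ++ ")"))
          ++ rfA_row p.2 deptl)
      cache
  else
    cache ++ data.foldl (fun output val => output ++ ("\n" ++ pyStrIntList val)) ""

-- ===== PORT B =====
-- a stack entry's node: either the root (a list of rows) or a row of ints
inductive PvNode where
  | lst : List (List Int) → PvNode
  | row : List Int → PvNode

def PvNode.len : PvNode → Nat
  | .lst l => l.length
  | .row r => r.length

-- '\n'+str(val) for each val of a leaf node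
def rfB_leafParts : PvNode → List String
  | .lst l => l.map (fun row => "\n" ++ pyStrIntList row)
  | .row r => r.map (fun v => "\n" ++ PySem.Int.toStr v)

def rfB_frameWeight : PvNode × Int × Option Int → Nat
  | (.lst l, _, _) => 1 + l.length
  | (.row _, _, _) => 1

-- the while-loop over the stack (head of the list = top of the stack; Python's push of the
-- children in reversed index order so they pop in order = prepending the in-order child frames)
def rfB_loop (stack : List (PvNode × Int × Option Int)) (parts : List String) : List String :=
  match stack with
  | [] => parts
  | (node, d, label) :: rest =>
    let parts :=
      match label with
      | some i => parts ++ ["\n=" ++ PySem.Int.toStr i ++ "=   (" ++ PySem.Int.toStr (node.len : Int) ++ ")"]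
      | none => parts
    if d > 0 then
      match node with
      | .lst l =>
          rfB_loop (((PySem.List.enumerate l).map (fun p => (PvNode.row p.2, d - 1, some p.1))) ++ rest) parts
      | .row _ =>
          -- Python would push the row's ints and then raise TypeError at their len();
          -- under Pre_ this row is empty, so nothing is pushed.
          rfB_loop rest parts
    else
      rfB_loop rest (parts ++ rfB_leafParts node)
termination_by (stack.map rfB_frameWeight).sum
decreasing_by
  · simp [rfB_frameWeight, Function.comp_def, PySem.List.length_enumerate]
  · simp [rfB_frameWeight]
  · cases node <;> simp [rfB_frameWeight]

def readFORviewer_sockets_data_small_alt (data : List (List Int)) (dept : Int) (le : Int) : String :=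
  let parts := if le ≠ 0 then [("(" ++ PySem.Int.toStr le ++ ") object(s)")] else []
  PySem.Str.join "" (rfB_loop [(PvNode.lst data, dept - 1, none)] parts)

-- ===== PRECONDITION & SPEC =====
-- Pre_ excludes exactly the inputs on which Python A raises TypeError (len() of an int):
-- dept ≥ 3 with some nonempty inner list makes A recurse into a row and call len on an int.
def Pre_readFORviewer_sockets_data_small (data : List (List Int)) (dept : Int) (le : Int) : Prop :=
  dept ≤ 2 ∨ ∀ row ∈ data, row = []
instance (data : List (List Int)) (dept : Int) (le : Int) : Decidable (Pre_readFORviewer_sockets_data_small data dept le) := by unfold Pre_readFORviewer_sockets_data_small; infer_instance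

def pvWitness_readFORviewer_sockets_data_small : List (List Int) × Int × Int := ([[1, 2], [3]], 2, 2)

def Spec_readFORviewer_sockets_data_small (data : List (List Int)) (dept : Int) (le : Int) (out : String) : Prop := out = readFORviewer_sockets_data_small_alt data dept le
instance (data : List (List Int)) (dept : Int) (le : Int) (out : String) : Decidable (Spec_readFORviewer_sockets_data_small data dept le out) := by unfold Spec_readFORviewer_sockets_data_small; infer_instance

-- ===== CLAIM (what is proved, stated in full; the proofs are below) =====
def Claim_equal_readFORviewer_sockets_data_small : Prop := ∀ (data : List (List Int)) (dept : Int) (le : Int), Dom_readFORviewer_sockets_data_small data dept le → Pre_readFORviewer_sockets_data_small data dept le → Spec_readFORviewer_sockets_data_small data dept le (readFORviewer_sockets_data_small data dept le)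

-- ===== LEMMAS AND PROOFS =====

theorem str_join_nil : PySem.Str.join "" ([] : List String) = "" := by decide

theorem str_join_cons (s : String) (l : List String) :
    PySem.Str.join "" (s :: l) = s ++ PySem.Str.join "" l := by
  have h : (([] : List Char)).intercalate (s.toList :: l.map String.toList)
      = s.toList ++ ([] : List Char).intercalate (l.map String.toList) := by
    cases l <;> simp [List.intercalate]
  simp [PySem.Str.join, PySem.Chars.join, h]

theorem str_join_append (a b : List String) :
    PySem.Str.join "" (a ++ b) = PySem.Str.join "" a ++ PySem.Str.join "" b := by
  induction a with
  | nil => simp [str_join_nil]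
  | cons x xs ih => simp [str_join_cons, ih, String.append_assoc]

-- a left fold that appends f v for each v equals the seed followed by the joined fragments
theorem foldl_append_eq_join {α : Type} (f : α → String) :
    ∀ (l : List α) (s : String),
      l.foldl (fun out v => out ++ f v) s = s ++ PySem.Str.join "" (l.map f) := by
  intro l
  induction l with
  | nil => intro s; simp [str_join_nil]
  | cons x xs ih => intro s; simp [List.foldl_cons, ih, str_join_cons, String.append_assoc]

-- the fragments emitted by B for a row frame of depth d with label i
def rfRowParts (d : Int) (p : Int × List Int) : List String :=
  ["\n=" ++ PySem.Int.toStr p.1 ++ "=   (" ++ PySem.Int.toStr (p.2.length : Int) ++ ")"]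
    ++ (if d > 0 then [] else p.2.map (fun v => "\n" ++ PySem.Int.toStr v))

-- running the loop through a block of row frames appends their fragments and continues
theorem rfB_loop_rows (d : Int) :
    ∀ (l : List (Int × List Int)) (rest : List (PvNode × Int × Option Int)) (parts : List String),
      rfB_loop ((l.map (fun p => (PvNode.row p.2, d, some p.1))) ++ rest) parts
        = rfB_loop rest (parts ++ l.flatMap (rfRowParts d)) := by
  intro l
  induction l with
  | nil => intro rest parts; simp
  | cons p ps ih =>
    intro rest parts
    by_cases hd : d > 0
    · simp [rfB_loop, PvNode.len, hd, ih, rfRowParts]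
    · simp [rfB_loop, PvNode.len, hd, ih, rfRowParts, rfB_leafParts, List.append_assoc]

-- each item's fragments join to the header plus A's recursive-call string
theorem join_rowParts (d : Int) (p : Int × List Int) :
    PySem.Str.join "" (rfRowParts (d - 1) p)
      = ("\n" ++ "=" ++ PySem.Int.toStr p.1 ++ "=   (" ++ PySem.Int.toStr (p.2.length : Int) ++ ")")
        ++ rfA_row p.2 d := by
  by_cases hd : d - 1 > 0
  · simp only [rfRowParts, rfA_row]
    rw [if_pos hd, if_pos hd]
    simp [str_join_cons, str_join_nil, String.append_assoc]
  · simp only [rfRowParts, rfA_row]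
    rw [if_neg hd, if_neg hd, foldl_append_eq_join]
    simp [str_join_cons, String.append_assoc]

theorem join_flatMap {α : Type} (f : α → List String) :
    ∀ (l : List α),
      PySem.Str.join "" (l.flatMap f) = PySem.Str.join "" (l.map (fun x => PySem.Str.join "" (f x))) := by
  intro l
  induction l with
  | nil => simp
  | cons x xs ih => simp [str_join_append, str_join_cons, ih]

-- ===== VERDICT (by name: the statement is the Claim_ definition above) =====
theorem readFORviewer_sockets_data_small_spec : Claim_equal_readFORviewer_sockets_data_small := by
  intro data dept le _hDom _hPre
  unfold Spec_readFORviewer_sockets_data_small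
  unfold readFORviewer_sockets_data_small readFORviewer_sockets_data_small_alt
  set cacheS : String := if le ≠ 0 then "" ++ ("(" ++ PySem.Int.toStr le ++ ") object(s)") else "" with hcache
  have hjoin0 : PySem.Str.join "" (if le ≠ 0 then [("(" ++ PySem.Int.toStr le ++ ") object(s)")] else []) = cacheS := by
    by_cases hle : le ≠ 0 <;> simp [hle, str_join_cons, str_join_nil, hcache]
  have hnil : ∀ p : List String, rfB_loop [] p = p := fun p => by simp [rfB_loop]
  by_cases hd : dept - 1 > 0
  · simp only [rfB_loop]
    rw [if_pos hd, if_pos hd]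
    have hloop := rfB_loop_rows (dept - 1 - 1) (PySem.List.enumerate data) []
      (if le ≠ 0 then [("(" ++ PySem.Int.toStr le ++ ") object(s)")] else [])
    rw [hloop, hnil]
    rw [str_join_append, hjoin0, join_flatMap]
    have hfold := foldl_append_eq_join
      (fun p : Int × List Int =>
        ("\n" ++ "=" ++ PySem.Int.toStr p.1 ++ "=   (" ++ PySem.Int.toStr (p.2.length : Int) ++ ")")
          ++ rfA_row p.2 (dept - 1))
      (PySem.List.enumerate data) cacheS
    simp only [String.append_assoc] at hfold ⊢
    rw [hfold]
    congr 1
    refine congrArg (PySem.Str.join "") (List.map_congr_left ?_)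
    intro p _
    rw [join_rowParts (dept - 1) p]
    simp only [String.append_assoc]
  · simp only [rfB_loop]
    rw [if_neg hd, if_neg hd]
    simp only [rfB_leafParts]
    rw [str_join_append, hjoin0]
    rw [foldl_append_eq_join (fun val => "\n" ++ pyStrIntList val) data ""]
    simp
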